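-- pv_equiv track=rewrite | github.com/MichalMarsalek/Advent-of-code | 2015/Day 15.py | find_recipes
-- ===== SOURCE A (Python) =====
-- def find_recipes(ingreds, spoons, calories = None):
--     unknown = [ingred for ingred in ingreds if ingreds[ingred] is None]
--     if len(unknown) == 0:
--         return [ingreds]
--     ingred = unknown[0]
--     ingreds2 = dict(ingreds)
--     recipes = []
--     limit = spoons - len(unknown) + 1
--     for i in range(limit if len(unknown) == 1 else 1, limit + 1):
--         ingreds2[ingred] = i
--         recipes.extend(find_recipes(ingreds2, spoons - i))
--     return recipes
-- ===== SOURCE B (Python) =====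
-- def find_recipes(ingreds, spoons, calories=None):
--     unknown = [k for k in ingreds if ingreds[k] is None]
--     if not unknown:
--         return [ingreds]
--     n = len(unknown)
--     # breadth-first prefix expansion, level by level, in lexicographic order
--     prefixes = [((), spoons)]
--     for j in range(n - 1):
--         prefixes = [(t + (i,), r - i)
--                     for (t, r) in prefixes
--                     for i in range(1, r - (n - 1 - j) + 1)]
--     out = []
--     for t, r in prefixes:
--         d = dict(ingreds)
--         for k, p in zip(unknown, t + (r,)):
--             d[k] = p
--         out.append(d)
--     return out
-- ===== Notes on version B (the rewrite author's own statement) =====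
-- stated objective: alternative
-- what changed: Replaces A's top-down recursion (which copies the dict and re-scans for unknown keys at every node of the call tree) by an iterative level-by-level expansion of composition prefixes followed by a single zip-update pass building each recipe dict.
import Mathlib
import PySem

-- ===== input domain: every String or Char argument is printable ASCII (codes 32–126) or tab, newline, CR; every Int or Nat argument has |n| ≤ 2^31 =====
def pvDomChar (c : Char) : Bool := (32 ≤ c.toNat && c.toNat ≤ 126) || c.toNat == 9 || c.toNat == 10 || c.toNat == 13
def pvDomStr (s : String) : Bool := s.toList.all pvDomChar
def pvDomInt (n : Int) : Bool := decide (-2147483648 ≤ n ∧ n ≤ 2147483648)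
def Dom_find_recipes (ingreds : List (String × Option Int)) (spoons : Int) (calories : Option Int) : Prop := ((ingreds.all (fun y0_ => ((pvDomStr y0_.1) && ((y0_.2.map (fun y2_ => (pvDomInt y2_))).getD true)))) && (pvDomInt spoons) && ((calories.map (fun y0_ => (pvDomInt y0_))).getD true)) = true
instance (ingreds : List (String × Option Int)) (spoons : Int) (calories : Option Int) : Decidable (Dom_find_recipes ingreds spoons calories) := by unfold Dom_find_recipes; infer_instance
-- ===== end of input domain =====

-- B replaces A's dict-copying recursion by an iterative level-by-level expansion of composition
-- prefixes plus one zip-update pass per recipe (objective: alternative; return value only, no mutation).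

-- ===== PORT A =====
-- shared helper: the comprehension '[k for k in ingreds if ingreds[k] is None]' (identical line in A and B)
def pvUnknown (d : List (String × Option Int)) : List String :=
  (d.map Prod.fst).filter (fun k => PySem.Dict.get? (PySem.Dict.mk d) k == some none)

-- termination measure for A's recursion: number of None values
def pvCNone (d : List (String × Option Int)) : Nat := d.countP (fun p => p.2.isNone)

theorem pvCNone_map_lt (d : List (String × Option Int)) (u : String) (i : Int) :
    PySem.Dict.get? (PySem.Dict.mk d) u = some none →
    (d.map (fun p => if p.1 == u then (u, some i) else p)).countP (fun p => p.2.isNone)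
      < d.countP (fun p => p.2.isNone) := by
  have hle : ∀ t : List (String × Option Int),
      (t.map (fun p => if p.1 == u then (u, some i) else p)).countP (fun p => p.2.isNone)
        ≤ t.countP (fun p => p.2.isNone) := by
    intro t
    induction t with
    | nil => simp
    | cons a t ih =>
      have hcontrib : ((if a.1 == u then (u, some i) else a).2.isNone = true → a.2.isNone = true)
          ∨ (if a.1 == u then (u, some i) else a).2.isNone = false := by
        by_cases h : a.1 == u <;> simp [h]
      rw [List.map_cons, List.countP_cons, List.countP_cons]
      rcases hcontrib with h | h
      · by_cases h2 : (if a.1 == u then (u, some i) else a).2.isNone = true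
        · rw [h2, h h2]; simp only [reduceIte]; omega
        · rw [Bool.not_eq_true] at h2; rw [h2]
          simp only [Bool.false_eq_true, reduceIte]
          omega
      · rw [h]; simp only [Bool.false_eq_true, reduceIte]; omega
  intro hg
  induction d with
  | nil => simp [PySem.Dict.get?] at hg
  | cons a t ih =>
    rw [PySem.Dict.get?_mk_cons] at hg
    by_cases h : a.1 == u
    · simp only [h, if_pos] at hg
      have ha : a.2 = none := by simpa using hg
      have h2 := hle t
      have hfa : (if a.1 == u then (u, some i) else a).2.isNone = false := by simp [h]
      rw [List.map_cons, List.countP_cons, List.countP_cons, hfa, ha]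
      simp only [Option.isNone_none, Bool.false_eq_true, reduceIte]
      omega
    · simp only [h, Bool.false_eq_true, if_false] at hg
      have hfa : (if a.1 == u then (u, some i) else a) = a := by simp [h]
      have := ih hg
      rw [List.map_cons, List.countP_cons, List.countP_cons, hfa]
      omega

theorem pvCNone_insert_lt (d : List (String × Option Int)) (u : String) (i : Int)
    (hg : PySem.Dict.get? (PySem.Dict.mk d) u = some none) :
    pvCNone ((PySem.Dict.insert (PySem.Dict.mk d) u (some i)).items) < pvCNone d := by
  have hc : (PySem.Dict.mk d).contains u = true := by
    rw [PySem.Dict.contains_eq_isSome_get?, hg]; rfl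
  rw [PySem.Dict.items_insert_of_contains _ _ hc]
  exact pvCNone_map_lt d u i hg

def find_recipes (ingreds : List (String × Option Int)) (spoons : Int) (calories : Option Int) :
    List (List (String × Option Int)) :=
  let unknown := pvUnknown ingreds
  if h : unknown = [] then [ingreds]
  else
    let ingred := unknown.head h
    let limit := spoons - (unknown.length : Int) + 1
    (PySem.List.pyRange (if unknown.length == 1 then limit else 1) (limit + 1) 1).foldl
      (fun recipes i =>
        recipes ++ find_recipes ((PySem.Dict.insert (PySem.Dict.mk ingreds) ingred (some i)).items)
          (spoons - i) none)
      []
termination_by pvCNone ingreds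
decreasing_by
  refine pvCNone_insert_lt ingreds _ i ?_
  have hm : (pvUnknown ingreds).head h ∈ pvUnknown ingreds := List.head_mem h
  have := (List.mem_filter.mp hm).2
  simpa using this

-- ===== PORT B =====
def find_recipes_alt (ingreds : List (String × Option Int)) (spoons : Int) (calories : Option Int) :
    List (List (String × Option Int)) :=
  let unknown := pvUnknown ingreds
  if unknown.isEmpty then [ingreds]
  else
    let n := unknown.length
    let prefixes := (List.range (n - 1)).foldl
      (fun acc j => acc.flatMap (fun tr =>
        (PySem.List.pyRange 1 (tr.2 - ((n - 1 - j : Nat) : Int) + 1) 1).map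
          (fun i => (tr.1 ++ [i], tr.2 - i))))
      [(([] : List Int), spoons)]
    prefixes.foldl
      (fun out tr =>
        out ++ [((unknown.zip (tr.1 ++ [tr.2])).foldl
          (fun d kp => PySem.Dict.insert d kp.1 (some kp.2)) (PySem.Dict.mk ingreds)).items])
      []

-- ===== PRECONDITION & SPEC =====
-- Pre_ excludes association lists with duplicate keys: they have no Python dict counterpart
-- (A's argument is a dict, which can never contain one), so the list representation is ambiguous there.
def Pre_find_recipes (ingreds : List (String × Option Int)) (spoons : Int) (calories : Option Int) : Prop :=
  (ingreds.map Prod.fst).Nodup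
instance (ingreds : List (String × Option Int)) (spoons : Int) (calories : Option Int) : Decidable (Pre_find_recipes ingreds spoons calories) := by unfold Pre_find_recipes; infer_instance

def pvWitness_find_recipes : (List (String × Option Int)) × Int × Option Int :=
  ([("a", none), ("b", some 3)], 4, none)

def Spec_find_recipes (ingreds : List (String × Option Int)) (spoons : Int) (calories : Option Int) (out : List (List (String × Option Int))) : Prop := out = find_recipes_alt ingreds spoons calories
instance (ingreds : List (String × Option Int)) (spoons : Int) (calories : Option Int) (out : List (List (String × Option Int))) : Decidable (Spec_find_recipes ingreds spoons calories out) := by unfold Spec_find_recipes; infer_instance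

-- ===== CLAIM (what is proved, stated in full; the proofs are below) =====
def Claim_equal_find_recipes : Prop := ∀ (ingreds : List (String × Option Int)) (spoons : Int) (calories : Option Int), Dom_find_recipes ingreds spoons calories → Pre_find_recipes ingreds spoons calories → Spec_find_recipes ingreds spoons calories (find_recipes ingreds spoons calories)

-- ===== LEMMAS AND PROOFS =====

-- building one recipe: the zip-update fold, as a function of the parts list
def applyP (d : List (String × Option Int)) (ks : List String) (ps : List Int) :
    List (String × Option Int) :=
  ((ks.zip ps).foldl (fun acc kp => PySem.Dict.insert acc kp.1 (some kp.2)) (PySem.Dict.mk d)).items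

-- ghost: the positive compositions of s into n parts, in A's (lexicographic) order
def compsR : Int → Nat → List (List Int)
  | _, 0 => [[]]
  | s, 1 => [[s]]
  | s, (n+2) => (PySem.List.pyRange 1 (s - ((n : Int) + 2) + 2) 1).flatMap
      (fun i => (compsR (s - i) (n + 1)).map (i :: ·))

def pvExt (b : Nat) (tr : List Int × Int) : List (List Int × Int) :=
  (PySem.List.pyRange 1 (tr.2 - (b : Int) + 1) 1).map (fun i => (tr.1 ++ [i], tr.2 - i))

def levels : Nat → List (List Int × Int) → List (List Int × Int)
  | 0, ps => ps
  | (m+1), ps => levels m (ps.flatMap (pvExt (m+1)))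

theorem levels_append (m : Nat) (ps qs : List (List Int × Int)) :
    levels m (ps ++ qs) = levels m ps ++ levels m qs := by
  induction m generalizing ps qs with
  | zero => rfl
  | succ m ih => simp [levels, List.flatMap_append, ih]

theorem levels_nil (m : Nat) : levels m [] = [] := by
  induction m with
  | zero => rfl
  | succ m ih => simp [levels, ih]

theorem levels_eq_flatMap (m : Nat) (ps : List (List Int × Int)) :
    levels m ps = ps.flatMap (fun p => levels m [p]) := by
  induction ps with
  | nil => simp [levels_nil]
  | cons p ps ih =>
    have : p :: ps = [p] ++ ps := rfl
    rw [this, levels_append, ih]; simp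

theorem foldl_range_levels (m : Nat) (ps : List (List Int × Int)) :
    (List.range m).foldl (fun acc j => acc.flatMap (fun tr => pvExt (m - j) tr)) ps
      = levels m ps := by
  induction m generalizing ps with
  | zero => rfl
  | succ m ih =>
    rw [List.range_succ_eq_map, List.foldl_cons, List.foldl_map]
    simp only [Nat.succ_sub_succ, Nat.sub_zero]
    rw [ih]
    rfl

theorem levels_single (m : Nat) : ∀ (t : List Int) (r : Int),
    (levels m [(t, r)]).map (fun tr => tr.1 ++ [tr.2]) = (compsR r (m + 1)).map (fun c => t ++ c) := by
  induction m with
  | zero => intro t r; simp [levels, compsR]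
  | succ m ih =>
    intro t r
    show (levels m ([(t, r)].flatMap (pvExt (m+1)))).map _ = _
    rw [List.flatMap_singleton, pvExt, levels_eq_flatMap, List.map_flatMap, List.flatMap_map]
    have : compsR r (m + 2) = (PySem.List.pyRange 1 (r - ((m : Int) + 2) + 2) 1).flatMap
        (fun i => (compsR (r - i) (m + 1)).map (i :: ·)) := rfl
    rw [this, List.map_flatMap]
    have hend : r - ((m : Int) + 2) + 2 = r - ((m : Nat) + 1 : Nat) + 1 := by push_cast; ring
    rw [← hend]
    refine List.flatMap_congr ?_
    intro i _
    rw [ih (t ++ [i]) (r - i), List.map_map]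
    refine List.map_congr_left ?_
    intro c _
    simp [List.append_assoc]

theorem applyP_cons (d : List (String × Option Int)) (u : String) (us : List String)
    (i : Int) (ps : List Int) :
    applyP d (u :: us) (i :: ps)
      = applyP ((PySem.Dict.insert (PySem.Dict.mk d) u (some i)).items) us ps := by
  simp [applyP]

theorem filter_kill_head {α : Type} [DecidableEq α] (l : List α) (p : α → Bool) (u : α)
    (us : List α) (hl : l.Nodup) (h : l.filter p = u :: us) :
    l.filter (fun k => if k = u then false else p k) = us := by
  induction l with
  | nil => simp at h
  | cons a t ih =>
    rcases List.nodup_cons.mp hl with ⟨hat, hnt⟩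
    by_cases hp : p a = true
    · rw [List.filter_cons_of_pos hp] at h
      obtain ⟨rfl, hus⟩ : a = u ∧ t.filter p = us := by
        constructor <;> [exact (List.cons.injEq .. ▸ h).1; exact (List.cons.injEq .. ▸ h).2]
      rw [List.filter_cons_of_neg (by simp)]
      rw [← hus]
      apply List.filter_congr
      intro k hk
      have : k ≠ a := fun he => hat (he ▸ hk)
      simp [this]
    · rw [List.filter_cons_of_neg (by simpa using hp)] at h
      have hu_mem : u ∈ t.filter p := h ▸ List.mem_cons_self ..
      have hau : a ≠ u := by
        intro he
        exact hp (he ▸ (List.mem_filter.mp hu_mem).2)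
      rw [List.filter_cons_of_neg (by simp [hau, hp])]
      exact ih hnt h

theorem keys_insert_items (d : List (String × Option Int)) (u : String) (v : Option Int)
    (hc : (PySem.Dict.mk d).contains u = true) :
    ((PySem.Dict.insert (PySem.Dict.mk d) u v).items).map Prod.fst = d.map Prod.fst := by
  rw [PySem.Dict.items_insert_of_contains _ _ hc]
  show (List.map Prod.fst (d.map _)) = _
  rw [List.map_map]
  apply List.map_congr_left
  intro p _
  by_cases h : p.1 == u
  · simp only [Function.comp, h, if_pos]
    simpa using (eq_of_beq h).symm
  · simp [Function.comp, h]

theorem get?_head_unknown (d : List (String × Option Int)) (u : String) (us : List String)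
    (h : pvUnknown d = u :: us) :
    PySem.Dict.get? (PySem.Dict.mk d) u = some none := by
  have hm : u ∈ pvUnknown d := h ▸ List.mem_cons_self ..
  have := (List.mem_filter.mp hm).2
  simpa using this

theorem contains_head_unknown (d : List (String × Option Int)) (u : String) (us : List String)
    (h : pvUnknown d = u :: us) : (PySem.Dict.mk d).contains u = true := by
  rw [PySem.Dict.contains_eq_isSome_get?, get?_head_unknown d u us h]; rfl

theorem unknown_insert (d : List (String × Option Int)) (u : String) (us : List String) (i : Int)
    (hnd : (d.map Prod.fst).Nodup) (h : pvUnknown d = u :: us) :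
    pvUnknown ((PySem.Dict.insert (PySem.Dict.mk d) u (some i)).items) = us := by
  have hc := contains_head_unknown d u us h
  unfold pvUnknown
  rw [keys_insert_items d u (some i) hc]
  have hg : ∀ k, PySem.Dict.get?
      (PySem.Dict.mk ((PySem.Dict.insert (PySem.Dict.mk d) u (some i)).items)) k
      = if k = u then some (some i) else PySem.Dict.get? (PySem.Dict.mk d) k := by
    intro k
    have : PySem.Dict.mk ((PySem.Dict.insert (PySem.Dict.mk d) u (some i)).items)
        = PySem.Dict.insert (PySem.Dict.mk d) u (some i) := rfl
    rw [this, PySem.Dict.get?_insert]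
  have := filter_kill_head (d.map Prod.fst)
      (fun k => PySem.Dict.get? (PySem.Dict.mk d) k == some none) u us hnd (by exact h)
  rw [← this]
  apply List.filter_congr
  intro k _
  rw [hg k]
  by_cases hk : k = u <;> simp [hk]

-- unfolding lemmas for A's recursion
theorem find_recipes_nil (d : List (String × Option Int)) (s : Int) (c : Option Int)
    (h : pvUnknown d = []) : find_recipes d s c = [d] := by
  rw [find_recipes]
  simp only [h, dif_pos]

theorem find_recipes_cons (d : List (String × Option Int)) (s : Int) (c : Option Int)
    (u : String) (us : List String) (h : pvUnknown d = u :: us) :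
    find_recipes d s c =
      (PySem.List.pyRange
          (if (u :: us).length == 1 then s - ((u :: us).length : Int) + 1 else 1)
          ((s - ((u :: us).length : Int) + 1) + 1) 1).foldl
        (fun recipes i =>
          recipes ++ find_recipes ((PySem.Dict.insert (PySem.Dict.mk d) u (some i)).items)
            (s - i) none) [] := by
  rw [find_recipes]
  rw [dif_neg (show ¬(pvUnknown d = []) by simp [h])]
  simp only [h, List.head_cons]

-- characterization of A
theorem A_char : ∀ (us : List String) (d : List (String × Option Int)) (s : Int)
    (c : Option Int) (u : String),
    (d.map Prod.fst).Nodup → pvUnknown d = u :: us →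
    find_recipes d s c = (compsR s (us.length + 1)).map (fun ps => applyP d (u :: us) ps) := by
  intro us
  induction us with
  | nil =>
    intro d s c u hnd h
    rw [find_recipes_cons d s c u [] h]
    rw [show (([u] : List String).length) = 1 from rfl]
    rw [show (((1 : Nat) == 1)) = true from rfl, if_pos rfl]
    rw [show s - ((1 : Nat) : Int) + 1 = s from by push_cast; ring]
    rw [PySem.List.pyRange_one_singleton, List.foldl_cons, List.foldl_nil]
    rw [find_recipes_nil _ _ _ (unknown_insert d u [] s hnd h)]
    simp [compsR, applyP]
  | cons u' us' ih =>
    intro d s c u hnd h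
    rw [find_recipes_cons d s c u (u' :: us') h]
    simp only [List.length_cons]
    rw [show ((us'.length + 1 + 1 : Nat) == 1) = false from by simp]
    simp only [Bool.false_eq_true, if_false]
    rw [PySem.List.foldl_append_eq_flatMap, List.nil_append]
    have hrw : compsR s (us'.length + 1 + 1)
        = (PySem.List.pyRange 1 (s - ((us'.length : Int) + 2) + 2) 1).flatMap
            (fun i => (compsR (s - i) (us'.length + 1)).map (i :: ·)) := rfl
    rw [hrw, List.map_flatMap]
    have hend : s - (((us'.length + 1 + 1 : Nat)) : Int) + 1 + 1
        = s - ((us'.length : Int) + 2) + 2 := by push_cast; ring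
    rw [hend]
    refine List.flatMap_congr ?_
    intro i _
    have hc := contains_head_unknown d u (u' :: us') h
    have hnd' : (((PySem.Dict.insert (PySem.Dict.mk d) u (some i)).items).map Prod.fst).Nodup := by
      rw [keys_insert_items d u (some i) hc]; exact hnd
    have hu' : pvUnknown ((PySem.Dict.insert (PySem.Dict.mk d) u (some i)).items) = u' :: us' :=
      unknown_insert d u (u' :: us') i hnd h
    rw [ih _ (s - i) none u' hnd' hu', List.map_map]
    refine List.map_congr_left ?_
    intro ps _
    simp only [Function.comp_apply]
    exact (applyP_cons d u (u' :: us') i ps).symm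

-- characterization of B
theorem B_char (us : List String) (d : List (String × Option Int)) (s : Int)
    (c : Option Int) (u : String) (h : pvUnknown d = u :: us) :
    find_recipes_alt d s c = (compsR s (us.length + 1)).map (fun ps => applyP d (u :: us) ps) := by
  unfold find_recipes_alt
  rw [h]
  simp only [List.isEmpty_cons, Bool.false_eq_true, if_false]
  rw [PySem.List.foldl_append_singleton_eq_map, List.nil_append]
  have hlev := foldl_range_levels ((u :: us).length - 1) [(([] : List Int), s)]
  simp only [pvExt] at hlev
  rw [hlev]
  simp only [List.length_cons, Nat.add_sub_cancel]
  have hsingle := levels_single us.length ([] : List Int) s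
  calc (levels us.length [(([] : List Int), s)]).map
          (fun tr => ((List.zip (u :: us) (tr.1 ++ [tr.2])).foldl
            (fun d kp => PySem.Dict.insert d kp.1 (some kp.2)) (PySem.Dict.mk d)).items)
      = (levels us.length [(([] : List Int), s)]).map
          ((fun ps => applyP d (u :: us) ps) ∘ (fun tr => tr.1 ++ [tr.2])) := rfl
    _ = ((levels us.length [(([] : List Int), s)]).map (fun tr => tr.1 ++ [tr.2])).map
          (fun ps => applyP d (u :: us) ps) := by rw [List.map_map]
    _ = (compsR s (us.length + 1)).map (fun ps => applyP d (u :: us) ps) := by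
          rw [hsingle]; simp

-- ===== VERDICT (by name: the statement is the Claim_ definition above) =====
theorem find_recipes_spec : Claim_equal_find_recipes := by
  intro ingreds spoons calories _ hpre
  unfold Spec_find_recipes
  cases h : pvUnknown ingreds with
  | nil =>
    rw [find_recipes]
    unfold find_recipes_alt
    simp [h]
  | cons u us =>
    rw [A_char us ingreds spoons calories u hpre h, B_char us ingreds spoons calories u h]
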